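-- pv_equiv track=rewrite | github.com/TSTanabe/HMSS2 | scripts/Csb_Mp_Algorithm.py | create_matchlists
-- ===== SOURCE A (Python) =====
-- def create_matchlists(Seqs_hash, Alphabet):
--     # für jeden buchstaben des alphabets, eine liste mit den indices verlinkd zu jedem wort
--     """
--     Input data like this
--     gene_clusters = {   "alpha":['rhd','tusA','dsrE','dra'],
--                         "beta":['lip','ghd','rhd','tusA','dsrE','dra'],
--                         "gamma":['ggf','rhd','dra','tusA','dsrE','dra','pfu'],
--                         "delta":['rhd','tusA','dsrE','dra'],
--                         "epsilon":['rhd','tusA','dsrE','dra']}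
--         Datastructure like this
--         {
--          'rhd': {'alpha': [0], 'beta': [2], 'gamma': [1], 'delta': [0], 'epsilon': [0]},
--          'dra': {'alpha': [3], 'beta': [5], 'gamma': [2, 5], 'delta': [3], 'epsilon': [3]},
--          'tusA': {'alpha': [1], 'beta': [3], 'gamma': [3], 'delta': [1], 'epsilon': [1]},
--          'dsrE': {'alpha': [2], 'beta': [4], 'gamma': [4], 'delta': [2], 'epsilon': [2]}
--         }
--     """
--
--     matchlists = {}  # Ein Dictionary zur Speicherung der Ergebnisse
--
--     # Initialisieren Sie die Matchlists für jedes Zeichen in Σ und jede Sequenz in S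
--     for character in Alphabet:
--         matchlists[character] = {}
--         for key,lst in Seqs_hash.items():
--             matchlists[character][key] = []
--
--     # Durchlaufen Sie die Sequenzen in S
--     for key,lst in Seqs_hash.items():
--         for i, item in enumerate(lst):
--             # Fügen Sie den Index i zur entsprechenden Matchlist für das Zeichen char hinzu
--             if item in Alphabet:
--                 matchlists[item][key].append(i)
--
--     return matchlists
-- ===== SOURCE B (Python) =====
-- def create_matchlists(Seqs_hash, Alphabet):
--     # Direct per-cell computation: each (character, key) cell is the list of
--     # positions of that character in the sequence, computed by a filtering
--     # comprehension -- no pre-initialization, no mutation, no scatter-append.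
--     return {character: {key: [i for i, item in enumerate(lst) if item == character]
--                         for key, lst in Seqs_hash.items()}
--             for character in Alphabet}
-- ===== Notes on version B (the rewrite author's own statement) =====
-- stated objective: simpler
-- what changed: A pre-initializes every (character,key) cell and then scatter-appends indices into the nested dict in one pass over the sequences; B builds each cell directly as a nested dict comprehension filtering positions of that character in that sequence, with no initialization pass and no mutation. Pre_ excludes association lists with duplicate keys, which cannot arise from a Python dict argument, so no input A accepts is excluded.
import Mathlib
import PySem

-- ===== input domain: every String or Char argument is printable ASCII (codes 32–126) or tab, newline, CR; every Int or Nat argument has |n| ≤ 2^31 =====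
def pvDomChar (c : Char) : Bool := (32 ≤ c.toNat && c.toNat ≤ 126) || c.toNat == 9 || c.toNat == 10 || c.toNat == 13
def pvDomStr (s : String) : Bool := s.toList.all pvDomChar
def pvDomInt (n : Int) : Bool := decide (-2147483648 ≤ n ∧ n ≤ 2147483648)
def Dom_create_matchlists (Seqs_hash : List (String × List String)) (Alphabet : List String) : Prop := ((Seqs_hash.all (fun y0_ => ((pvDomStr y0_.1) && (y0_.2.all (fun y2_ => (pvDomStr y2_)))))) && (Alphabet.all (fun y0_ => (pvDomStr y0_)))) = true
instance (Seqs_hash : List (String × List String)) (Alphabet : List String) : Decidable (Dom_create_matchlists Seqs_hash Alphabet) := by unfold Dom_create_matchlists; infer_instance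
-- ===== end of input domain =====

-- B replaces A's init-then-scatter-append construction by directly computing each
-- (character,key) cell as a filtered position list via nested comprehensions (simpler, no mutation).


-- ===== PORT A =====
-- The Python guard `item in Alphabet` guarantees both dict lookups hit existing keys, so the
-- KeyError branch of matchlists[item][key] is unreachable and Dict.modify (with a default) is exact.
def create_matchlists (Seqs_hash : List (String × List String)) (Alphabet : List String) : List (String × List (String × List Int)) :=
  let init : PySem.Dict String (PySem.Dict String (List Int)) :=
    Alphabet.foldl (fun m c =>
      m.insert c (Seqs_hash.foldl (fun inner kv => inner.insert kv.1 ([] : List Int)) PySem.Dict.empty))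
      PySem.Dict.empty
  let filled :=
    Seqs_hash.foldl (fun m kv =>
      (PySem.List.enumerate kv.2).foldl (fun m p =>
        if p.2 ∈ Alphabet then
          m.modify p.2 PySem.Dict.empty (fun inner => inner.modify kv.1 [] (fun l => l ++ [p.1]))
        else m) m) init
  filled.items.map (fun p => (p.1, p.2.items))

-- ===== PORT B =====
-- nested dict comprehension; [i for i, item in enumerate(lst) if item == character] = filter + map
def create_matchlists_alt (Seqs_hash : List (String × List String)) (Alphabet : List String) : List (String × List (String × List Int)) :=
  (Alphabet.foldl (fun m character =>
      m.insert character (Seqs_hash.foldl (fun inner kv =>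
          inner.insert kv.1 (((PySem.List.enumerate kv.2).filter (fun p => p.2 == character)).map (·.1)))
        PySem.Dict.empty))
    PySem.Dict.empty).items.map (fun p => (p.1, p.2.items))

-- ===== PRECONDITION & SPEC =====
-- Pre_ excludes association lists with duplicate keys: the Python parameter is a dict, whose
-- association-list image always has pairwise-distinct keys, so no input A accepts is excluded.
def Pre_create_matchlists (Seqs_hash : List (String × List String)) (_Alphabet : List String) : Prop :=
  (Seqs_hash.map Prod.fst).Nodup
instance (Seqs_hash : List (String × List String)) (Alphabet : List String) : Decidable (Pre_create_matchlists Seqs_hash Alphabet) := by unfold Pre_create_matchlists; infer_instance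

def pvWitness_create_matchlists : (List (String × List String)) × List String :=
  ([("alpha", ["rhd", "tusA"]), ("beta", ["dra", "rhd"])], ["rhd", "dra"])

def Spec_create_matchlists (Seqs_hash : List (String × List String)) (Alphabet : List String) (out : List (String × List (String × List Int))) : Prop := out = create_matchlists_alt Seqs_hash Alphabet
instance (Seqs_hash : List (String × List String)) (Alphabet : List String) (out : List (String × List (String × List Int))) : Decidable (Spec_create_matchlists Seqs_hash Alphabet out) := by unfold Spec_create_matchlists; infer_instance

-- ===== CLAIM (what is proved, stated in full; the proofs are below) =====
def Claim_equal_create_matchlists : Prop := ∀ (Seqs_hash : List (String × List String)) (Alphabet : List String), Dom_create_matchlists Seqs_hash Alphabet → Pre_create_matchlists Seqs_hash Alphabet → Spec_create_matchlists Seqs_hash Alphabet (create_matchlists Seqs_hash Alphabet)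

-- ===== LEMMAS AND PROOFS =====

-- positions of character c in a word list, as Python's enumerate produces them
def pvPos (c : String) (lst : List String) : List Int :=
  ((PySem.List.enumerate lst).filter (fun p => p.2 == c)).map (·.1)

theorem familyDict_modify {ν : Type} (L : List String) (hL : L.Nodup) (g : String → ν)
    (c' : String) (hc : c' ∈ L) (d0 : ν) (h : ν → ν) :
    (PySem.Dict.mk (L.map (fun c => (c, g c)))).modify c' d0 h
      = PySem.Dict.mk (L.map (fun c => (c, if c = c' then h (g c) else g c))) := by
  have hkeys : (PySem.Dict.mk (L.map (fun c => (c, g c)))).keys = L := by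
    simp [PySem.Dict.keys_mk, Function.comp_def]
  have hnd : (PySem.Dict.mk (L.map (fun c => (c, g c)))).keys.Nodup := by rw [hkeys]; exact hL
  have hmem : (c', g c') ∈ (PySem.Dict.mk (L.map (fun c => (c, g c)))).items :=
    List.mem_map_of_mem hc
  have hget : (PySem.Dict.mk (L.map (fun c => (c, g c)))).getD c' d0 = g c' :=
    PySem.Dict.getD_of_mem_items _ hmem hnd d0
  have hcont : (PySem.Dict.mk (L.map (fun c => (c, g c)))).contains c' = true := by
    simp only [PySem.Dict.contains_mk, List.any_map, List.any_eq_true]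
    refine ⟨c', hc, ?_⟩
    simp
  unfold PySem.Dict.modify
  rw [hget]
  ext1
  rw [PySem.Dict.items_insert_of_contains _ _ hcont]
  simp only [List.map_map]
  apply List.map_congr_left
  intro c _
  by_cases hcc : c = c'
  · subst hcc; simp
  · simp [hcc, beq_iff_eq]

theorem familyDict_foldl_insert {ν : Type} (f : String → ν) (l : List String) :
    ∀ (K : List String), K.Nodup →
    l.foldl (fun m c => m.insert c (f c)) (PySem.Dict.mk (K.map (fun c => (c, f c))))
      = PySem.Dict.mk ((PySem.Set.update K l : List String).map (fun c => (c, f c))) := by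
  induction l with
  | nil => intro K hK; simp [PySem.Set.update]
  | cons c l ih =>
    intro K hK
    simp only [List.foldl_cons]
    by_cases hc : c ∈ K
    · have hcont : (PySem.Dict.mk (K.map (fun c => (c, f c)))).contains c = true := by
        simp only [PySem.Dict.contains_mk, List.any_map, List.any_eq_true]
        refine ⟨c, hc, ?_⟩
        simp
      have hins : (PySem.Dict.mk (K.map (fun c => (c, f c)))).insert c (f c)
          = PySem.Dict.mk (K.map (fun c => (c, f c))) := by
        ext1
        rw [PySem.Dict.items_insert_of_contains _ _ hcont]
        simp only [List.map_map]
        apply List.map_congr_left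
        intro x _
        by_cases hx : x = c
        · subst hx; simp
        · simp [hx, beq_iff_eq]
      have hadd : PySem.Set.add K c = K := by
        simp [PySem.Set.add, hc]
      rw [hins, ih K hK]
      simp [PySem.Set.update, hadd]
    · have hcont : (PySem.Dict.mk (K.map (fun c => (c, f c)))).contains c = false := by
        simp [PySem.Dict.contains_mk, beq_iff_eq]
        intro x hx hxc; exact hc (hxc ▸ hx)
      have hins : (PySem.Dict.mk (K.map (fun c => (c, f c)))).insert c (f c)
          = PySem.Dict.mk ((K ++ [c]).map (fun c => (c, f c))) := by
        ext1
        rw [PySem.Dict.items_insert_of_not_contains _ _ hcont]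
        simp
      have hadd : PySem.Set.add K c = K ++ [c] := by
        simp [PySem.Set.add, hc]
      have hnd : (K ++ [c]).Nodup := by
        simp [List.nodup_append, hK]
        intro a ha hac; exact hc (hac ▸ ha)
      rw [hins, ih _ hnd]
      simp [PySem.Set.update, hadd]

theorem innerFold_family (K : List String) (hK : K.Nodup) (k : String) (hk : k ∈ K) (c : String) :
    ∀ (ps : List (Int × String)) (w : String → List Int),
    ps.foldl (fun inner p => if p.2 = c then inner.modify k [] (fun l => l ++ [p.1]) else inner)
      (PySem.Dict.mk (K.map (fun k' => (k', w k'))))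
      = PySem.Dict.mk (K.map (fun k' =>
          (k', if k' = k then w k' ++ (ps.filter (fun p => p.2 == c)).map (·.1) else w k'))) := by
  intro ps
  induction ps with
  | nil =>
    intro w
    simp only [List.foldl_nil, List.filter_nil, List.map_nil, List.append_nil]
    apply congrArg
    apply List.map_congr_left
    intro k' _
    by_cases h : k' = k <;> simp [h]
  | cons p ps ih =>
    intro w
    simp only [List.foldl_cons, List.filter_cons]
    by_cases hpc : p.2 = c
    · rw [if_pos hpc, familyDict_modify K hK w k hk [] (fun l => l ++ [p.1]), ih]
      apply congrArg
      apply List.map_congr_left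
      intro k' _
      by_cases hk' : k' = k
      · simp [hk', hpc, List.append_assoc]
      · simp [hk']
    · rw [if_neg hpc, ih]
      apply congrArg
      apply List.map_congr_left
      intro k' _
      have : (p.2 == c) = false := by simp; exact hpc
      simp [this]

theorem phase2_one (Aℓ : List String) (k : String) :
    ∀ (ps : List (Int × String)) (g : String → PySem.Dict String (List Int)),
    ps.foldl (fun m p =>
        if p.2 ∈ Aℓ then
          m.modify p.2 PySem.Dict.empty (fun inner => inner.modify k [] (fun l => l ++ [p.1]))
        else m)
      (PySem.Dict.mk ((PySem.Set.ofList Aℓ : List String).map (fun c => (c, g c))))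
      = PySem.Dict.mk ((PySem.Set.ofList Aℓ : List String).map (fun c =>
          (c, ps.foldl (fun inner p =>
                if p.2 = c then inner.modify k [] (fun l => l ++ [p.1]) else inner) (g c)))) := by
  intro ps
  induction ps with
  | nil => intro g; simp
  | cons p ps ih =>
    intro g
    simp only [List.foldl_cons]
    by_cases hpA : p.2 ∈ Aℓ
    · have hpL : p.2 ∈ (PySem.Set.ofList Aℓ : List String) :=
        (PySem.Set.mem_ofList Aℓ p.2).mpr hpA
      rw [if_pos hpA,
        familyDict_modify _ (PySem.Set.nodup_ofList Aℓ) g p.2 hpL PySem.Dict.empty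
          (fun inner => inner.modify k [] (fun l => l ++ [p.1])), ih]
      apply congrArg
      apply List.map_congr_left
      intro c _
      by_cases hcp : c = p.2
      · subst hcp; simp
      · have : ¬ p.2 = c := fun h => hcp h.symm
        simp [hcp, this]
    · rw [if_neg hpA, ih]
      apply congrArg
      apply List.map_congr_left
      intro c hcL
      have hcA : c ∈ Aℓ := (PySem.Set.mem_ofList Aℓ c).mp hcL
      have : ¬ p.2 = c := fun h => hpA (h ▸ hcA)
      simp [this]

theorem phase2_family (Aℓ : List String) :
    ∀ (S : List (String × List String)) (g : String → PySem.Dict String (List Int)),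
    S.foldl (fun m kv =>
        (PySem.List.enumerate kv.2).foldl (fun m p =>
          if p.2 ∈ Aℓ then
            m.modify p.2 PySem.Dict.empty (fun inner => inner.modify kv.1 [] (fun l => l ++ [p.1]))
          else m) m)
      (PySem.Dict.mk ((PySem.Set.ofList Aℓ : List String).map (fun c => (c, g c))))
      = PySem.Dict.mk ((PySem.Set.ofList Aℓ : List String).map (fun c =>
          (c, S.foldl (fun inner kv =>
                (PySem.List.enumerate kv.2).foldl (fun inner p =>
                  if p.2 = c then inner.modify kv.1 [] (fun l => l ++ [p.1]) else inner) inner)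
              (g c)))) := by
  intro S
  induction S with
  | nil => intro g; simp
  | cons kv S ih =>
    intro g
    simp only [List.foldl_cons]
    rw [phase2_one Aℓ kv.1 (PySem.List.enumerate kv.2) g, ih]

theorem foldl_no_key (c t : String) :
    ∀ (S : List (String × List String)) (a : List Int), (∀ kv' ∈ S, kv'.1 ≠ t) →
    S.foldl (fun acc kv' => if kv'.1 = t then acc ++ pvPos c kv'.2 else acc) a = a := by
  intro S
  induction S with
  | nil => intro a _; simp
  | cons hd tl ih =>
    intro a h
    simp only [List.foldl_cons]
    rw [if_neg (h hd (List.mem_cons_self))]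
    exact ih a (fun kv' hkv' => h kv' (List.mem_cons_of_mem hd hkv'))

theorem foldl_one_key (c : String) :
    ∀ (S : List (String × List String)), (S.map Prod.fst).Nodup →
    ∀ kv ∈ S, ∀ (a : List Int),
    S.foldl (fun acc kv' => if kv'.1 = kv.1 then acc ++ pvPos c kv'.2 else acc) a = a ++ pvPos c kv.2 := by
  intro S
  induction S with
  | nil => intro _ kv h; exact absurd h (List.not_mem_nil)
  | cons hd tl ih =>
    intro hnd kv hkv a
    simp only [List.map_cons, List.nodup_cons] at hnd
    simp only [List.foldl_cons]
    rcases List.mem_cons.mp hkv with h | h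
    · subst h
      rw [if_pos rfl]
      apply foldl_no_key
      intro kv' hkv' heq
      exact hnd.1 (heq ▸ List.mem_map_of_mem hkv')
    · have hne : hd.1 ≠ kv.1 := by
        intro heq
        exact hnd.1 (heq ▸ List.mem_map_of_mem h)
      rw [if_neg hne]
      exact ih hnd.2 kv h a

theorem acc_inner_gen (c : String) (K : List String) (hK : K.Nodup) :
    ∀ (T : List (String × List String)) (w : String → List Int), (∀ kv ∈ T, kv.1 ∈ K) →
    T.foldl (fun inner kv =>
        (PySem.List.enumerate kv.2).foldl (fun inner p =>
          if p.2 = c then inner.modify kv.1 [] (fun l => l ++ [p.1]) else inner) inner)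
      (PySem.Dict.mk (K.map (fun k' => (k', w k'))))
      = PySem.Dict.mk (K.map (fun k' =>
          (k', T.foldl (fun acc kv => if kv.1 = k' then acc ++ pvPos c kv.2 else acc) (w k')))) := by
  intro T
  induction T with
  | nil => intro w _; simp
  | cons kv T ih =>
    intro w hsub
    simp only [List.foldl_cons]
    rw [innerFold_family K hK kv.1 (hsub kv (List.mem_cons_self)) c (PySem.List.enumerate kv.2) w,
      ih _ (fun kv' h => hsub kv' (List.mem_cons_of_mem kv h))]
    apply congrArg
    apply List.map_congr_left
    intro k' _
    by_cases h : kv.1 = k'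
    · have h' : k' = kv.1 := h.symm
      simp only [if_pos h, if_pos h']
      rfl
    · have h' : ¬ k' = kv.1 := fun e => h e.symm
      simp only [if_neg h, if_neg h']

theorem create_matchlists_spec' : ∀ (S : List (String × List String)) (A : List String),
    (S.map Prod.fst).Nodup → create_matchlists S A = create_matchlists_alt S A := by
  intro S A hnd
  have hmapfst : ∀ {β : Type} (f : String → β), (S.map Prod.fst).map (fun k' => (k', f k'))
      = S.map (fun kv => (kv.1, f kv.1)) := by
    intro β f; rw [List.map_map]; rfl
  -- A side: create_matchlists S A projects the character-major family of pvPos lists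
  have hinner0 : S.foldl (fun inner kv => inner.insert kv.1 ([] : List Int)) PySem.Dict.empty
      = PySem.Dict.mk (S.map (fun kv => (kv.1, ([] : List Int)))) := by
    ext1
    rw [PySem.Dict.items_foldl_insert_fresh S Prod.fst (fun _ => ([] : List Int)) PySem.Dict.empty
      (fun a _ => PySem.Dict.contains_empty a.1) hnd]
    rfl
  have hinit : A.foldl (fun m c =>
        m.insert c (S.foldl (fun inner kv => inner.insert kv.1 ([] : List Int)) PySem.Dict.empty))
        PySem.Dict.empty
      = PySem.Dict.mk ((PySem.Set.ofList A : List String).map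
          (fun c => (c, PySem.Dict.mk (S.map (fun kv => (kv.1, ([] : List Int))))))) := by
    rw [hinner0]
    exact familyDict_foldl_insert (fun _ => PySem.Dict.mk (S.map (fun kv => (kv.1, ([] : List Int))))) A [] List.nodup_nil
  have hA : create_matchlists S A
      = ((PySem.Set.ofList A : List String).map
          (fun c => (c, S.map (fun kv => (kv.1, pvPos c kv.2))))) := by
    simp only [create_matchlists]
    rw [hinit, phase2_family A S]
    have hacc : ∀ c : String,
        S.foldl (fun inner kv =>
            (PySem.List.enumerate kv.2).foldl (fun inner p =>
              if p.2 = c then inner.modify kv.1 [] (fun l => l ++ [p.1]) else inner) inner)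
          (PySem.Dict.mk (S.map (fun kv => (kv.1, ([] : List Int)))))
        = PySem.Dict.mk (S.map (fun kv => (kv.1, pvPos c kv.2))) := by
      intro c
      rw [← hmapfst (fun _ => ([] : List Int)),
        acc_inner_gen c (S.map Prod.fst) hnd S (fun _ => []) (fun kv h => List.mem_map_of_mem h)]
      apply congrArg
      rw [List.map_map]
      apply List.map_congr_left
      intro kv hkv
      have := foldl_one_key c S hnd kv hkv []
      simp only [Function.comp_apply]
      rw [this]
      simp
    simp only [List.map_map]
    apply List.map_congr_left
    intro c _
    simp only [Function.comp_apply, hacc c]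
  -- B side: the nested insert folds build exactly that family
  have hinnerB : ∀ c : String,
      S.foldl (fun inner kv => inner.insert kv.1 (pvPos c kv.2)) PySem.Dict.empty
      = PySem.Dict.mk (S.map (fun kv => (kv.1, pvPos c kv.2))) := by
    intro c
    ext1
    rw [PySem.Dict.items_foldl_insert_fresh S Prod.fst (fun kv => pvPos c kv.2) PySem.Dict.empty
      (fun a _ => PySem.Dict.contains_empty a.1) hnd]
    rfl
  have hB : create_matchlists_alt S A
      = ((PySem.Set.ofList A : List String).map
          (fun c => (c, S.map (fun kv => (kv.1, pvPos c kv.2))))) := by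
    unfold create_matchlists_alt
    have harg : A.foldl (fun m c =>
          m.insert c (S.foldl (fun inner kv => inner.insert kv.1 (pvPos c kv.2)) PySem.Dict.empty))
          PySem.Dict.empty
        = A.foldl (fun m c =>
          m.insert c (PySem.Dict.mk (S.map (fun kv => (kv.1, pvPos c kv.2))))) PySem.Dict.empty := by
      apply PySem.List.foldl_congr_mem
      intro acc c _
      rw [hinnerB c]
    show (A.foldl (fun m c =>
        m.insert c (S.foldl (fun inner kv => inner.insert kv.1 (pvPos c kv.2)) PySem.Dict.empty))
        PySem.Dict.empty).items.map (fun p => (p.1, p.2.items)) = _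
    rw [harg]
    have h0 : (PySem.Dict.empty : PySem.Dict String (PySem.Dict String (List Int)))
        = PySem.Dict.mk (([] : List String).map (fun c =>
            (c, PySem.Dict.mk (S.map (fun kv => (kv.1, pvPos c kv.2)))))) := rfl
    rw [h0, familyDict_foldl_insert
      (fun c => PySem.Dict.mk (S.map (fun kv => (kv.1, pvPos c kv.2)))) A [] List.nodup_nil]
    have hupd : (PySem.Set.update ([] : List String) A : List String) = PySem.Set.ofList A := rfl
    rw [hupd]
    simp only [List.map_map]
    apply List.map_congr_left
    intro c _
    rfl
  rw [hA, hB]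

-- ===== VERDICT (by name: the statement is the Claim_ definition above) =====
theorem create_matchlists_spec : Claim_equal_create_matchlists := by
  intro S A _ hpre
  exact create_matchlists_spec' S A hpre
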